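-- pv_equiv track=rewrite | github.com/EDA-Teaching-RJH/assignment-foundations-of-programming-azsi-exe | fleet_manager.py | calculate_payroll
-- ===== SOURCE A (Python) =====
-- def calculate_payroll(ranks):
--     total = 0
--
--     for rank in ranks: # assign credit values to each rank
--         if rank == "Captain":
--             total += 1600
--         elif rank == "Commander":
--             total+= 1100
--         elif rank == "Lt. Commander":
--             total+= 700
--         elif rank == "Lieutenant":
--             total+= 400
--         elif rank == "Lt. Junior Grade":
--             total+= 200
--         elif rank == "Ensign":
--             total+= 100
--
--     return total # adds total
-- ===== SOURCE B (Python) =====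
-- def calculate_payroll(ranks):
--     # Build a frequency map once, then iterate over the fixed rank->credit table.
--     counts = {}
--     for r in ranks:
--         counts[r] = counts.get(r, 0) + 1
--     table = {
--         "Captain": 1600,
--         "Commander": 1100,
--         "Lt. Commander": 700,
--         "Lieutenant": 400,
--         "Lt. Junior Grade": 200,
--         "Ensign": 100,
--     }
--     return sum(credit * counts.get(rank, 0) for rank, credit in table.items())
-- ===== Notes on version B (the rewrite author's own statement) =====
-- stated objective: alternative
-- what changed: B aggregates the input into a frequency map first and then sums over the fixed six-entry rank->credit table weighted by counts, instead of A's per-element if/elif accumulation.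
import Mathlib
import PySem

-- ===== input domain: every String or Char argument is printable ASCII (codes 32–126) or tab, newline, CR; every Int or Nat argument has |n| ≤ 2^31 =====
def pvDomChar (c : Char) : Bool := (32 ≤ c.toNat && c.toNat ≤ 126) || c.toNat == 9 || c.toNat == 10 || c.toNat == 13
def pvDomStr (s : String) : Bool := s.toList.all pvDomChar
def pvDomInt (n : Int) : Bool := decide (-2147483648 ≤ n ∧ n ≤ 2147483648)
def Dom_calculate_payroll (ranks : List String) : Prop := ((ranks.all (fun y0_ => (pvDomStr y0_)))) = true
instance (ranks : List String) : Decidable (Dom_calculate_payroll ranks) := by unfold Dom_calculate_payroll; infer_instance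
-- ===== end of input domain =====

-- B replaces A's per-element if/elif accumulation by a frequency map summed against the fixed rank->credit table (alternative decomposition, same cost).

-- ===== PORT A =====
def calculate_payroll (ranks : List String) : Int :=
  ranks.foldl (fun total rank =>
    if rank == "Captain" then total + 1600
    else if rank == "Commander" then total + 1100
    else if rank == "Lt. Commander" then total + 700
    else if rank == "Lieutenant" then total + 400
    else if rank == "Lt. Junior Grade" then total + 200
    else if rank == "Ensign" then total + 100
    else total) 0

-- ===== PORT B =====
def pvTable : List (String × Int) :=
  [("Captain", 1600), ("Commander", 1100), ("Lt. Commander", 700),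
   ("Lieutenant", 400), ("Lt. Junior Grade", 200), ("Ensign", 100)]

def calculate_payroll_alt (ranks : List String) : Int :=
  let counts : PySem.Dict String Int :=
    ranks.foldl (fun d r => d.insert r (d.getD r 0 + 1)) PySem.Dict.empty
  (pvTable.map (fun rc => rc.2 * counts.getD rc.1 0)).sum

-- ===== PRECONDITION & SPEC =====
def Spec_calculate_payroll (ranks : List String) (out : Int) : Prop := out = calculate_payroll_alt ranks
instance (ranks : List String) (out : Int) : Decidable (Spec_calculate_payroll ranks out) := by unfold Spec_calculate_payroll; infer_instance

-- ===== CLAIM (what is proved, stated in full; the proofs are below) =====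
def Claim_equal_calculate_payroll : Prop := ∀ (ranks : List String), Dom_calculate_payroll ranks → Spec_calculate_payroll ranks (calculate_payroll ranks)

-- ===== LEMMAS AND PROOFS =====

def pvStep (total : Int) (rank : String) : Int :=
  if rank == "Captain" then total + 1600
  else if rank == "Commander" then total + 1100
  else if rank == "Lt. Commander" then total + 700
  else if rank == "Lieutenant" then total + 400
  else if rank == "Lt. Junior Grade" then total + 200
  else if rank == "Ensign" then total + 100
  else total

lemma cp_eq (ranks : List String) : calculate_payroll ranks = ranks.foldl pvStep 0 := rfl

lemma step_shift (t : Int) (x : String) : pvStep t x = t + pvStep 0 x := by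
  unfold pvStep; split_ifs <;> ring

lemma foldl_shift (xs : List String) (t : Int) :
    xs.foldl pvStep t = t + xs.foldl pvStep 0 := by
  induction xs generalizing t with
  | nil => simp
  | cons x xs ih =>
    simp only [List.foldl_cons]
    rw [ih (pvStep t x), ih (pvStep 0 x), step_shift]
    ring

lemma alt_counts (ranks : List String) :
    calculate_payroll_alt ranks =
      1600 * (ranks.count "Captain" : Int) + 1100 * (ranks.count "Commander" : Int)
      + 700 * (ranks.count "Lt. Commander" : Int) + 400 * (ranks.count "Lieutenant" : Int)
      + 200 * (ranks.count "Lt. Junior Grade" : Int) + 100 * (ranks.count "Ensign" : Int) := by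
  simp [calculate_payroll_alt, pvTable, PySem.Dict.getD_foldl_insert_add_one,
        PySem.Dict.getD_empty]
  ring

lemma a_counts (ranks : List String) :
    calculate_payroll ranks =
      1600 * (ranks.count "Captain" : Int) + 1100 * (ranks.count "Commander" : Int)
      + 700 * (ranks.count "Lt. Commander" : Int) + 400 * (ranks.count "Lieutenant" : Int)
      + 200 * (ranks.count "Lt. Junior Grade" : Int) + 100 * (ranks.count "Ensign" : Int) := by
  induction ranks with
  | nil => simp [cp_eq]
  | cons x xs ih =>
    rw [cp_eq, List.foldl_cons, foldl_shift, ← cp_eq, ih]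
    simp only [List.count_cons, pvStep, beq_iff_eq]
    split_ifs <;> subst_vars <;> simp_all <;> push_cast <;> ring

-- ===== VERDICT (by name: the statement is the Claim_ definition above) =====
theorem calculate_payroll_spec : Claim_equal_calculate_payroll := by
  intro ranks _
  unfold Spec_calculate_payroll
  rw [a_counts, alt_counts]
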